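-- pv_equiv track=rewrite | github.com/ai-wes/LM-GYM | llm_gym/envs/dialogue.py | _check_element
-- ===== SOURCE A (Python) =====
-- def _check_element(element: str, response: str) -> bool:
--     """Check if a required element is present in the response."""
--     response = response.lower()
--
--     if element == "politeness":
--         polite_words = {"please", "thank", "appreciate", "would you", "could you"}
--         return any(word in response for word in polite_words)
--
--     elif element == "coherence":
--         # Simple check for minimum length and sentence structure
--         return len(response.split()) >= 5 and "." in response
--
--     elif element == "emotional_awareness":
--         emotion_words = {"feel", "emotion", "happy", "sad", "understand", "empathize"}
--         return any(word in response for word in emotion_words)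
--
--     elif element == "conflict_resolution":
--         resolution_words = {"resolve", "solution", "agree", "compromise", "suggest"}
--         return any(word in response for word in resolution_words)
--
--     elif element == "cultural_sensitivity":
--         culture_words = {"culture", "background", "tradition", "respect", "diverse"}
--         return any(word in response for word in culture_words)
--
--     return False
-- ===== SOURCE B (Python) =====
-- _TABLE = [
--     ("politeness", ("please", "thank", "appreciate", "would you", "could you")),
--     ("emotional_awareness", ("feel", "emotion", "happy", "sad", "understand", "empathize")),
--     ("conflict_resolution", ("resolve", "solution", "agree", "compromise", "suggest")),
--     ("cultural_sensitivity", ("culture", "background", "tradition", "respect", "diverse")),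
-- ]
--
--
-- def _check_element(element: str, response: str) -> bool:
--     """Check if a required element is present in the response."""
--     r = response.lower()
--     # Stage 1: compute ALL elements satisfied by the response.
--     present = [name for name, words in _TABLE if any(w in r for w in words)]
--     if len(r.split()) >= 5 and "." in r:
--         present.append("coherence")
--     # Stage 2: membership test.
--     return element in present
-- ===== Notes on version B (the rewrite author's own statement) =====
-- stated objective: alternative
-- what changed: Instead of dispatching on the element and running one keyword scan, B first computes the full list of elements the response satisfies (filtering a (name, keywords) table, appending 'coherence' when the length/sentence guard holds) and then answers by a membership test 'element in present'; unknown elements fail the membership test instead of a final return False.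
import Mathlib
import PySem

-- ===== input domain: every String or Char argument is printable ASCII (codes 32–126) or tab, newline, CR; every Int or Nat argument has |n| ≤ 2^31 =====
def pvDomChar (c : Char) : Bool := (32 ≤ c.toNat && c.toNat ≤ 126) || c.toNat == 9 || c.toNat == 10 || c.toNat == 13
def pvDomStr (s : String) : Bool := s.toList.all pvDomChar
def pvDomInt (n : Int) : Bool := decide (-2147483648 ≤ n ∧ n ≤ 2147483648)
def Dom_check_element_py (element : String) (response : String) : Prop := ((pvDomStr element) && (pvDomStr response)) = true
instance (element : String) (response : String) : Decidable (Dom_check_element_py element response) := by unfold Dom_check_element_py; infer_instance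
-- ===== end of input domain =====

-- B first computes the list of ALL elements the response satisfies, then answers by membership (objective: alternative).

-- ===== PORT A =====
def check_element_py (element : String) (response : String) : Bool :=
  let response := PySem.Str.lower response
  if element == "politeness" then
    (PySem.Set.ofList ["please", "thank", "appreciate", "would you", "could you"]).any
      (fun word => PySem.Str.isIn word response)
  else if element == "coherence" then
    decide (5 ≤ (PySem.Str.split₀ response).length) && PySem.Str.isIn "." response
  else if element == "emotional_awareness" then
    (PySem.Set.ofList ["feel", "emotion", "happy", "sad", "understand", "empathize"]).any
      (fun word => PySem.Str.isIn word response)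
  else if element == "conflict_resolution" then
    (PySem.Set.ofList ["resolve", "solution", "agree", "compromise", "suggest"]).any
      (fun word => PySem.Str.isIn word response)
  else if element == "cultural_sensitivity" then
    (PySem.Set.ofList ["culture", "background", "tradition", "respect", "diverse"]).any
      (fun word => PySem.Str.isIn word response)
  else
    false

-- ===== PORT B =====
def pvTable : List (String × List String) :=
  [ ("politeness", ["please", "thank", "appreciate", "would you", "could you"])
  , ("emotional_awareness", ["feel", "emotion", "happy", "sad", "understand", "empathize"])
  , ("conflict_resolution", ["resolve", "solution", "agree", "compromise", "suggest"])
  , ("cultural_sensitivity", ["culture", "background", "tradition", "respect", "diverse"]) ]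

def check_element_py_alt (element : String) (response : String) : Bool :=
  let r := PySem.Str.lower response
  -- Stage 1: all elements satisfied by the response.
  let present := (pvTable.filter (fun p => p.2.any (fun w => PySem.Str.isIn w r))).map Prod.fst
  let present := if decide (5 ≤ (PySem.Str.split₀ r).length) && PySem.Str.isIn "." r
                 then present ++ ["coherence"] else present
  -- Stage 2: membership test.
  present.contains element

-- ===== PRECONDITION & SPEC =====
def Spec_check_element_py (element : String) (response : String) (out : Bool) : Prop := out = check_element_py_alt element response
instance (element : String) (response : String) (out : Bool) : Decidable (Spec_check_element_py element response out) := by unfold Spec_check_element_py; infer_instance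

-- ===== CLAIM (what is proved, stated in full; the proofs are below) =====
def Claim_equal_check_element_py : Prop := ∀ (element : String) (response : String), Dom_check_element_py element response → Spec_check_element_py element response (check_element_py element response)

-- ===== LEMMAS AND PROOFS =====

-- ===== VERDICT (by name: the statement is the Claim_ definition above) =====
theorem check_element_py_spec : Claim_equal_check_element_py := by
  intro element response _
  show check_element_py element response = check_element_py_alt element response
  unfold check_element_py check_element_py_alt pvTable
  by_cases e1 : element = "politeness"
  · subst e1
    simp only [List.contains_eq_mem, String.reduceBEq, Bool.false_eq_true, if_false, if_true,
      beq_self_eq_true]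
    split <;> simp [List.mem_filter, List.any_eq]
  · by_cases e2 : element = "coherence"
    · subst e2
      simp only [List.contains_eq_mem, String.reduceBEq, Bool.false_eq_true, if_false, if_true,
        beq_self_eq_true]
      split <;> simp_all [List.mem_filter, List.any_eq]
    · by_cases e3 : element = "emotional_awareness"
      · subst e3
        simp only [List.contains_eq_mem, String.reduceBEq, Bool.false_eq_true, if_false, if_true,
          beq_self_eq_true]
        split <;> simp [List.mem_filter, List.any_eq]
      · by_cases e4 : element = "conflict_resolution"
        · subst e4
          simp only [List.contains_eq_mem, String.reduceBEq, Bool.false_eq_true, if_false, if_true,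
            beq_self_eq_true]
          split <;> simp [List.mem_filter, List.any_eq]
        · by_cases e5 : element = "cultural_sensitivity"
          · subst e5
            simp only [List.contains_eq_mem, String.reduceBEq, Bool.false_eq_true, if_false,
              if_true, beq_self_eq_true]
            split <;> simp [List.mem_filter, List.any_eq]
          · simp only [List.contains_eq_mem, beq_iff_eq, e1, e2, e3, e4, e5, if_false]
            split <;> simp [List.mem_filter, List.any_eq, e1, e2, e3, e4, e5]
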